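-- pv_equiv track=rewrite | github.com/davidwad/advent-of-code | 2023/14/rocks2.py | shuffle_rocks_reverse
-- ===== SOURCE A (Python) =====
-- from queue import PriorityQueue
-- from enum import Enum
--
-- class RockType(Enum):
--     SQUARE = 1
--     ROUND = 2
--     EMPTY = 3
--
-- def shuffle_rocks_reverse(rocks: list[str]) -> list[str]:
--     queue = PriorityQueue()
--     priority = 0
--     rocks.reverse()
--     for char in rocks:
--         if char == '#':
--             priority -= 100
--             queue.put((priority, -RockType.SQUARE.value))
--         elif char == 'O':
--             queue.put((priority, -RockType.ROUND.value))
--         else: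
--             queue.put((priority, -RockType.EMPTY.value))
--
--     result = []
--     for _ in range(len(rocks)):
--         element = queue.get()[1]
--         if element == -RockType.SQUARE.value:
--             result.append('#')
--         elif element == -RockType.ROUND.value:
--             result.append('O')
--         else:
--             result.append('.')
--
--     return result
-- ===== SOURCE B (Python) =====
-- def shuffle_rocks_reverse(rocks: list[str]) -> list[str]:
--     # Single forward counting pass: within each '#'-delimited segment emit
--     # '.'s, then 'O's, keeping each '#' in place. Return value only: unlike A,
--     # this does not reverse the input list in place.
--     result = []
--     o = e = 0
--     for char in rocks:
--         if char == '#':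
--             result.extend(['.'] * e)
--             result.extend(['O'] * o)
--             result.append('#')
--             o = e = 0
--         elif char == 'O':
--             o += 1
--         else:
--             e += 1
--     result.extend(['.'] * e)
--     result.extend(['O'] * o)
--     return result
-- ===== Notes on version B (the rewrite author's own statement) =====
-- stated objective: faster
-- what changed: A reverses the list in place and sorts one (priority, kind) tuple per cell through a PriorityQueue; B does a single forward counting pass that, per '#'-delimited segment, emits the counted '.'s then 'O's and keeps each '#' in place (return value identical; B does not mutate its argument).
import Mathlib
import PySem

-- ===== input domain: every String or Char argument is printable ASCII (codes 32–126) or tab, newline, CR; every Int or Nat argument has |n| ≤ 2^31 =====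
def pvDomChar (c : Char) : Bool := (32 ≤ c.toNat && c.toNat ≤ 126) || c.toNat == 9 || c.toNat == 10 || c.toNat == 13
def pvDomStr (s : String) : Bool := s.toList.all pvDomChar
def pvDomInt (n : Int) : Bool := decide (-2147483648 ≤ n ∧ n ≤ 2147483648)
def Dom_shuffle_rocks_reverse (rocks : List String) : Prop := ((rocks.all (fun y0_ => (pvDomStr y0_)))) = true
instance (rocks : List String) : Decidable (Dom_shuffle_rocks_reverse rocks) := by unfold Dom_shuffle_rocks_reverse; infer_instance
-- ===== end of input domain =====

-- B replaces A's priority-queue sort with one linear counting pass per '#'-segment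
-- (objective: faster, O(n) vs O(n log n)). A reverses its argument in place; the
-- equivalence proved here is about the RETURN value only (B does not mutate).

-- ===== PORT A =====
-- Python tuple order on (priority, value) pairs (lexicographic ≤).
def pqLeb (a b : Int × Int) : Bool := a.1 < b.1 || (a.1 == b.1 && a.2 ≤ b.2)

-- queue.put: the PriorityQueue is ported as an ordered list, put = ordered insert
-- (ties here are identical tuples, so any heap order gives the same list).
def pqPut (q : List (Int × Int)) (x : Int × Int) : List (Int × Int) :=
  match q with
  | [] => [x]
  | y :: ys => if pqLeb x y then x :: y :: ys else y :: pqPut ys x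

-- first loop body: priority bookkeeping + put, branch for branch.
def pvLoopA (st : Int × List (Int × Int)) (c : String) : Int × List (Int × Int) :=
  if c = "#" then (st.1 - 100, pqPut st.2 (st.1 - 100, -1))
  else if c = "O" then (st.1, pqPut st.2 (st.1, -2))
  else (st.1, pqPut st.2 (st.1, -3))

-- second loop: range(len(rocks)) gets, queue.get = pop the least element (the head);
-- the [] branch is unreachable (the queue holds one element per char).
def pvDrain : Nat → List (Int × Int) → List String
  | 0, _ => []
  | _ + 1, [] => []
  | n + 1, x :: xs =>
      (if x.2 = -1 then "#" else if x.2 = -2 then "O" else ".") :: pvDrain n xs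

def shuffle_rocks_reverse (rocks : List String) : List String :=
  let rev := rocks.reverse
  let st := rev.foldl pvLoopA (0, [])
  pvDrain rev.length st.2

-- ===== PORT B =====
-- state: (result, o, e) — the emitted prefix and the 'O' / empty counts of the open segment.
def pvStepB (st : List String × Nat × Nat) (c : String) : List String × Nat × Nat :=
  if c = "#" then
    (st.1 ++ List.replicate st.2.2 "." ++ List.replicate st.2.1 "O" ++ ["#"], 0, 0)
  else if c = "O" then (st.1, st.2.1 + 1, st.2.2)
  else (st.1, st.2.1, st.2.2 + 1)

def shuffle_rocks_reverse_alt (rocks : List String) : List String :=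
  let st := rocks.foldl pvStepB ([], 0, 0)
  st.1 ++ List.replicate st.2.2 "." ++ List.replicate st.2.1 "O"

-- ===== PRECONDITION & SPEC =====
def Spec_shuffle_rocks_reverse (rocks : List String) (out : List String) : Prop := out = shuffle_rocks_reverse_alt rocks
instance (rocks : List String) (out : List String) : Decidable (Spec_shuffle_rocks_reverse rocks out) := by unfold Spec_shuffle_rocks_reverse; infer_instance

-- ===== CLAIM (what is proved, stated in full; the proofs are below) =====
def Claim_equal_shuffle_rocks_reverse : Prop := ∀ (rocks : List String), Dom_shuffle_rocks_reverse rocks → Spec_shuffle_rocks_reverse rocks (shuffle_rocks_reverse rocks)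


-- the (priority, value) pairs A's first loop puts, reading cs with current priority p
def pairsOf : List String → Int → List (Int × Int)
  | [], _ => []
  | c :: cs, p =>
      if c = "#" then (p - 100, -1) :: pairsOf cs (p - 100)
      else if c = "O" then (p, -2) :: pairsOf cs p
      else (p, -3) :: pairsOf cs p

-- the same multiset read in ORIGINAL order with ascending priorities
def pairsSpec : List String → Int → List (Int × Int)
  | [], _ => []
  | c :: cs, p =>
      if c = "#" then (p, -1) :: pairsSpec cs (p + 100)
      else if c = "O" then (p, -2) :: pairsSpec cs p
      else (p, -3) :: pairsSpec cs p

-- the sorted pair list, built left-to-right with segment counters (mirrors B)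
def tgt : List String → Int → Nat → Nat → List (Int × Int)
  | [], p, o, e => List.replicate e (p, -3) ++ List.replicate o (p, -2)
  | c :: cs, p, o, e =>
      if c = "#" then
        List.replicate e (p, -3) ++ List.replicate o (p, -2) ++ (p, -1) :: tgt cs (p + 100) 0 0
      else if c = "O" then tgt cs p (o + 1) e
      else tgt cs p o (e + 1)

def toChar (x : Int × Int) : String :=
  if x.2 = -1 then "#" else if x.2 = -2 then "O" else "."

def hcount : List String → Int
  | [] => 0
  | c :: cs => (if c = "#" then 1 else 0) + hcount cs

def bSpec : List String → Nat → Nat → List String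
  | [], o, e => List.replicate e "." ++ List.replicate o "O"
  | c :: cs, o, e =>
      if c = "#" then
        List.replicate e "." ++ List.replicate o "O" ++ "#" :: bSpec cs 0 0
      else if c = "O" then bSpec cs (o + 1) e
      else bSpec cs o (e + 1)

def pqLE (a b : Int × Int) : Prop := pqLeb a b = true

theorem pqLE_iff (a b : Int × Int) : pqLE a b ↔ (a.1 < b.1 ∨ (a.1 = b.1 ∧ a.2 ≤ b.2)) := by
  simp [pqLE, pqLeb]

theorem pqLE_refl (a : Int × Int) : pqLE a a := by
  rw [pqLE_iff]; omega

theorem pqLE_total (a b : Int × Int) : pqLE a b ∨ pqLE b a := by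
  rw [pqLE_iff, pqLE_iff]; omega

theorem pqLE_trans (a b c : Int × Int) : pqLE a b → pqLE b c → pqLE a c := by
  rw [pqLE_iff, pqLE_iff, pqLE_iff]; omega

theorem pqLE_antisymm (a b : Int × Int) : pqLE a b → pqLE b a → a = b := by
  intro h1 h2
  rw [pqLE_iff] at h1 h2
  rw [Prod.ext_iff]; omega

theorem loopA_snd (cs : List String) : ∀ (p : Int) (q : List (Int × Int)),
    (List.foldl pvLoopA (p, q) cs).2 = List.foldl pqPut q (pairsOf cs p) := by
  induction cs with
  | nil => intro p q; rfl
  | cons c cs ih =>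
      intro p q
      simp only [List.foldl, pairsOf, pvLoopA]
      by_cases h : c = "#" <;> by_cases h2 : c = "O" <;> simp [h, h2, ih]

theorem pairsOf_length (cs : List String) : ∀ p, (pairsOf cs p).length = cs.length := by
  induction cs with
  | nil => intro p; rfl
  | cons c cs ih =>
      intro p; simp only [pairsOf]
      by_cases h : c = "#" <;> by_cases h2 : c = "O" <;> simp [h, h2, ih]

theorem hcount_append (xs ys : List String) : hcount (xs ++ ys) = hcount xs + hcount ys := by
  induction xs with
  | nil => simp [hcount]
  | cons c cs ih => simp [hcount, ih]; ring

theorem hcount_reverse (cs : List String) : hcount cs.reverse = hcount cs := by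
  induction cs with
  | nil => rfl
  | cons c cs ih => simp [hcount, hcount_append, ih]; ring

theorem pairsOf_append (xs ys : List String) : ∀ p,
    pairsOf (xs ++ ys) p = pairsOf xs p ++ pairsOf ys (p - 100 * hcount xs) := by
  induction xs with
  | nil => intro p; simp [pairsOf, hcount]
  | cons c cs ih =>
      intro p
      by_cases h : c = "#"
      · subst h
        rw [show ("#" :: cs) ++ ys = "#" :: (cs ++ ys) from rfl,
          show pairsOf ("#" :: (cs ++ ys)) p = (p - 100, -1) :: pairsOf (cs ++ ys) (p - 100) from rfl,
          show pairsOf ("#" :: cs) p = (p - 100, -1) :: pairsOf cs (p - 100) from rfl,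
          show hcount ("#" :: cs) = 1 + hcount cs from rfl, ih, List.cons_append,
          show p - 100 - 100 * hcount cs = p - 100 * (1 + hcount cs) from by ring]
      · by_cases h2 : c = "O"
        · subst h2
          rw [show ("O" :: cs) ++ ys = "O" :: (cs ++ ys) from rfl,
            show pairsOf ("O" :: (cs ++ ys)) p = (p, -2) :: pairsOf (cs ++ ys) p from rfl,
            show pairsOf ("O" :: cs) p = (p, -2) :: pairsOf cs p from rfl,
            show hcount ("O" :: cs) = 0 + hcount cs from rfl, ih, List.cons_append,
            show p - 100 * hcount cs = p - 100 * (0 + hcount cs) from by ring]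
        · rw [show (c :: cs) ++ ys = c :: (cs ++ ys) from rfl,
            show pairsOf (c :: (cs ++ ys)) p = (p, -3) :: pairsOf (cs ++ ys) p from by
              simp [pairsOf, h, h2],
            show pairsOf (c :: cs) p = (p, -3) :: pairsOf cs p from by simp [pairsOf, h, h2],
            show hcount (c :: cs) = hcount cs from by simp [hcount, h], ih, List.cons_append]

theorem pqPut_perm (q : List (Int × Int)) (x : Int × Int) : List.Perm (pqPut q x) (x :: q) := by
  induction q with
  | nil => rfl
  | cons y ys ih =>
      simp only [pqPut]
      split
      · rfl
      · exact (ih.cons y).trans (List.Perm.swap x y ys)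

theorem foldl_pqPut_perm (l : List (Int × Int)) : ∀ q,
    List.Perm (List.foldl pqPut q l) (q ++ l) := by
  induction l with
  | nil => intro q; simp
  | cons x xs ih =>
      intro q
      refine (ih (pqPut q x)).trans ?_
      refine ((pqPut_perm q x).append_right xs).trans ?_
      simpa using (List.perm_middle (a := x) (l₁ := q) (l₂ := xs)).symm

theorem pqPut_sorted (q : List (Int × Int)) (x : Int × Int) (h : List.Pairwise pqLE q) :
    List.Pairwise pqLE (pqPut q x) := by
  induction q with
  | nil => simp [pqPut]
  | cons y ys ih =>
      rcases List.pairwise_cons.mp h with ⟨hy, hys⟩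
      simp only [pqPut]
      split
      · rename_i hle
        refine List.pairwise_cons.mpr ⟨?_, h⟩
        intro z hz
        rcases List.mem_cons.mp hz with hz | hz
        · exact hz ▸ hle
        · exact pqLE_trans x y z hle (hy z hz)
      · rename_i hnle
        refine List.pairwise_cons.mpr ⟨?_, ih hys⟩
        intro z hz
        rcases List.mem_cons.mp ((pqPut_perm ys x).mem_iff.mp hz) with hz | hz
        · exact hz ▸ (pqLE_total x y).resolve_left hnle
        · exact hy z hz

theorem foldl_pqPut_sorted (l : List (Int × Int)) : ∀ q, List.Pairwise pqLE q →
    List.Pairwise pqLE (List.foldl pqPut q l) := by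
  induction l with
  | nil => intro q h; exact h
  | cons x xs ih => intro q h; exact ih _ (pqPut_sorted q x h)

theorem mem_tgt (cs : List String) : ∀ p o e x, x ∈ tgt cs p o e → p ≤ x.1 := by
  induction cs with
  | nil =>
      intro p o e x hx
      rcases List.mem_append.mp hx with hx | hx <;>
        · obtain rfl := List.eq_of_mem_replicate hx; exact le_refl p
  | cons c cs ih =>
      intro p o e x hx
      simp only [tgt] at hx
      by_cases h : c = "#"
      · rw [if_pos h] at hx
        rcases List.mem_append.mp hx with hx | hx
        · rcases List.mem_append.mp hx with hx | hx <;>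
            · obtain rfl := List.eq_of_mem_replicate hx; exact le_refl p
        · rcases List.mem_cons.mp hx with rfl | hx
          · exact le_refl p
          · have := ih (p + 100) 0 0 x hx; omega
      · rw [if_neg h] at hx
        by_cases h2 : c = "O"
        · rw [if_pos h2] at hx; exact ih p (o + 1) e x hx
        · rw [if_neg h2] at hx; exact ih p o (e + 1) x hx

theorem pairwise_rep (n : Nat) (a : Int × Int) : List.Pairwise pqLE (List.replicate n a) := by
  induction n with
  | zero => simp
  | succ n ih =>
      rw [List.replicate_succ]
      refine List.pairwise_cons.mpr ⟨?_, ih⟩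
      intro b hb
      obtain rfl := List.eq_of_mem_replicate hb
      exact pqLE_refl _

theorem pairwise_seg (p : Int) (o e : Nat) (rest : List (Int × Int))
    (hrest : List.Pairwise pqLE rest)
    (hge : ∀ x ∈ rest, p < x.1 ∨ (x.1 = p ∧ x.2 = -1)) :
    List.Pairwise pqLE (List.replicate e (p, -3) ++ List.replicate o (p, -2) ++ rest) := by
  rw [List.append_assoc]
  refine List.pairwise_append.mpr ⟨pairwise_rep _ _, List.pairwise_append.mpr
    ⟨pairwise_rep _ _, hrest, ?_⟩, ?_⟩
  · intro a ha b hb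
    obtain rfl := List.eq_of_mem_replicate ha
    have := hge b hb
    rw [pqLE_iff]; omega
  · intro a ha b hb
    obtain rfl := List.eq_of_mem_replicate ha
    rcases List.mem_append.mp hb with hb | hb
    · obtain rfl := List.eq_of_mem_replicate hb
      rw [pqLE_iff]; omega
    · have := hge b hb
      rw [pqLE_iff]; omega

theorem tgt_sorted (cs : List String) : ∀ p o e, List.Pairwise pqLE (tgt cs p o e) := by
  induction cs with
  | nil =>
      intro p o e
      simpa using pairwise_seg p o e [] List.Pairwise.nil (by simp)
  | cons c cs ih =>
      intro p o e
      simp only [tgt]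
      by_cases h : c = "#"
      · rw [if_pos h]
        refine pairwise_seg p o e _ ?_ ?_
        · refine List.pairwise_cons.mpr ⟨?_, ih (p + 100) 0 0⟩
          intro z hz
          have := mem_tgt cs (p + 100) 0 0 z hz
          rw [pqLE_iff]; omega
        · intro x hx
          rcases List.mem_cons.mp hx with rfl | hx
          · right; exact ⟨rfl, rfl⟩
          · left; have := mem_tgt cs (p + 100) 0 0 x hx; omega
      · rw [if_neg h]
        by_cases h2 : c = "O"
        · rw [if_pos h2]; exact ih p (o + 1) e
        · rw [if_neg h2]; exact ih p o (e + 1)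

theorem tgt_perm (cs : List String) : ∀ p o e,
    List.Perm (tgt cs p o e)
      (List.replicate e (p, -3) ++ List.replicate o (p, -2) ++ pairsSpec cs p) := by
  induction cs with
  | nil => intro p o e; simp [tgt, pairsSpec]
  | cons c cs ih =>
      intro p o e
      simp only [tgt, pairsSpec]
      by_cases h : c = "#"
      · rw [if_pos h, if_pos h]
        refine List.Perm.append_left _ (List.Perm.cons _ ?_)
        simpa using ih (p + 100) 0 0
      · rw [if_neg h, if_neg h]
        by_cases h2 : c = "O"
        · rw [if_pos h2, if_pos h2]
          refine (ih p (o + 1) e).trans ?_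
          rw [List.replicate_succ]
          simp only [List.cons_append, List.append_assoc]
          exact List.Perm.append_left _
            (List.perm_middle (a := ((p : Int), -2)) (l₁ := List.replicate o ((p : Int), -2))
              (l₂ := pairsSpec cs p)).symm
        · rw [if_neg h2, if_neg h2]
          refine (ih p o (e + 1)).trans ?_
          rw [List.replicate_succ]
          exact (List.perm_middle (a := ((p : Int), -3))
            (l₁ := List.replicate e ((p : Int), -3) ++ List.replicate o (p, -2))
            (l₂ := pairsSpec cs p)).symm

theorem pairs_rev_perm (rocks : List String) :
    List.Perm (pairsOf rocks.reverse 0) (pairsSpec rocks (-100 * hcount rocks)) := by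
  induction rocks with
  | nil => simp [pairsOf, pairsSpec]
  | cons c cs ih =>
      rw [List.reverse_cons, pairsOf_append, hcount_reverse]
      simp only [pairsSpec, pairsOf, hcount]
      by_cases h : c = "#"
      · rw [if_pos h, if_pos h, if_pos h]
        rw [show (0 : Int) - 100 * hcount cs - 100 = -100 * (1 + hcount cs) from by ring,
          show (-100 * (1 + hcount cs) + 100 : Int) = -100 * hcount cs from by ring]
        exact (List.perm_append_singleton _ _).trans (ih.cons _)
      · rw [if_neg h, if_neg h, if_neg h,
          show (-100 * ((0 : Int) + hcount cs) : Int) = -100 * hcount cs from by ring,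
          show (0 : Int) - 100 * hcount cs = -100 * hcount cs from by ring]
        by_cases h2 : c = "O"
        · rw [if_pos h2, if_pos h2]
          exact (List.perm_append_singleton _ _).trans (ih.cons _)
        · rw [if_neg h2, if_neg h2]
          exact (List.perm_append_singleton _ _).trans (ih.cons _)

theorem map_toChar_tgt (cs : List String) : ∀ p o e,
    List.map toChar (tgt cs p o e) = bSpec cs o e := by
  induction cs with
  | nil => intro p o e; simp [tgt, bSpec, toChar]
  | cons c cs ih =>
      intro p o e
      simp only [tgt, bSpec]
      by_cases h : c = "#"
      · simp [h, toChar, ih]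
      · by_cases h2 : c = "O" <;> simp [h, h2, ih]

theorem foldlB_eq (cs : List String) : ∀ (res : List String) (o e : Nat),
    (List.foldl pvStepB (res, o, e) cs).1
      ++ List.replicate (List.foldl pvStepB (res, o, e) cs).2.2 "."
      ++ List.replicate (List.foldl pvStepB (res, o, e) cs).2.1 "O"
    = res ++ bSpec cs o e := by
  induction cs with
  | nil => intro res o e; simp [bSpec]
  | cons c cs ih =>
      intro res o e
      simp only [List.foldl, pvStepB, bSpec]
      by_cases h : c = "#"
      · simp [h, ih]
      · by_cases h2 : c = "O" <;> simp [h, h2, ih]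

theorem drain_eq_map (q : List (Int × Int)) : pvDrain q.length q = List.map toChar q := by
  induction q with
  | nil => rfl
  | cons x xs ih => simp [pvDrain, toChar, ih]

-- ===== VERDICT (by name: the statement is the Claim_ definition above) =====
theorem shuffle_rocks_reverse_spec : Claim_equal_shuffle_rocks_reverse := by
  intro rocks _
  show pvDrain rocks.reverse.length (List.foldl pvLoopA (0, []) rocks.reverse).2
      = shuffle_rocks_reverse_alt rocks
  rw [loopA_snd]
  have hperm : List.Perm (List.foldl pqPut [] (pairsOf rocks.reverse 0))
      (pairsOf rocks.reverse 0) := by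
    simpa using foldl_pqPut_perm (pairsOf rocks.reverse 0) []
  have hlen : (List.foldl pqPut [] (pairsOf rocks.reverse 0)).length = rocks.reverse.length := by
    rw [hperm.length_eq, pairsOf_length]
  rw [← hlen, drain_eq_map]
  have hQ : List.foldl pqPut [] (pairsOf rocks.reverse 0)
      = tgt rocks (-100 * hcount rocks) 0 0 := by
    refine List.Perm.eq_of_pairwise (fun a b _ _ => pqLE_antisymm a b)
      (foldl_pqPut_sorted _ [] List.Pairwise.nil) (tgt_sorted rocks _ 0 0) ?_
    refine (hperm.trans (pairs_rev_perm rocks)).trans ?_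
    simpa using (tgt_perm rocks (-100 * hcount rocks) 0 0).symm
  rw [hQ, map_toChar_tgt]
  show bSpec rocks 0 0
      = (List.foldl pvStepB ([], 0, 0) rocks).1
        ++ List.replicate (List.foldl pvStepB ([], 0, 0) rocks).2.2 "."
        ++ List.replicate (List.foldl pvStepB ([], 0, 0) rocks).2.1 "O"
  simpa using (foldlB_eq rocks [] 0 0).symm
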